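-- pv_equiv track=rewrite | github.com/ryanjw888/KukuiBot | server_helpers.py | repair_tool_items
-- ===== SOURCE A (Python) =====
-- def repair_tool_items(items: list[dict]) -> list[dict]:
--     """Ensure function_call/function_call_output pairs are valid for Responses API.
--
--     - Remove orphan function_call_output entries (no prior matching function_call)
--     - Insert synthetic function_call_output for any unpaired function_call
--     """
--     if not isinstance(items, list):
--         return items
--
--     repaired = list(items)
--
--     # Pass 1: drop orphan outputs that reference unknown call_ids
--     seen_calls = set()
--     i = 0
--     while i < len(repaired):
--         it = repaired[i]
--         if isinstance(it, dict) and it.get("type") == "function_call":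
--             cid = it.get("call_id")
--             if cid:
--                 seen_calls.add(cid)
--         elif isinstance(it, dict) and it.get("type") == "function_call_output":
--             cid = it.get("call_id")
--             if not cid or cid not in seen_calls:
--                 repaired.pop(i)
--                 continue
--         i += 1
--
--     # Pass 2: ensure every function_call has an immediate output after it
--     i = 0
--     while i < len(repaired):
--         if isinstance(repaired[i], dict) and repaired[i].get("type") == "function_call":
--             cid = repaired[i].get("call_id")
--             if i + 1 >= len(repaired) or repaired[i + 1].get("type") != "function_call_output" or repaired[i + 1].get("call_id") != cid:
--                 repaired.insert(i + 1, {"type": "function_call_output", "call_id": cid, "output": "ERROR: Tool execution was interrupted."})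
--                 i += 2
--                 continue
--         i += 1
--
--     return repaired
-- ===== SOURCE B (Python) =====
-- def repair_tool_items(items: list[dict]) -> list[dict]:
--     """Single forward pass: keep a seen-call_ids set and the pending call's
--     call_id; drop orphan outputs, flush a synthetic output whenever a pending
--     call is not immediately answered."""
--     if not isinstance(items, list):
--         return items
--
--     result = []
--     seen = set()
--     pending = None  # [cid] of the last appended function_call still awaiting its output
--
--     def flush():
--         nonlocal pending
--         if pending is not None:
--             result.append({"type": "function_call_output", "call_id": pending[0],
--                            "output": "ERROR: Tool execution was interrupted."})
--             pending = None
--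
--     for it in items:
--         t = it.get("type") if isinstance(it, dict) else None
--         if t == "function_call":
--             flush()
--             result.append(it)
--             cid = it.get("call_id")
--             if cid:
--                 seen.add(cid)
--             pending = [cid]
--         elif t == "function_call_output":
--             cid = it.get("call_id")
--             if not cid or cid not in seen:
--                 continue  # orphan output: drop it
--             if pending is not None and pending[0] == cid:
--                 result.append(it)
--                 pending = None
--             else:
--                 flush()
--                 result.append(it)
--         else:
--             flush()
--             result.append(it)
--     flush()
--     return result
-- ===== Notes on version B (the rewrite author's own statement) =====
-- stated objective: alternative
-- what changed: Replaces A's two index-mutating while-loop passes (pop(i) of orphan outputs, then insert(i+1) of synthetic outputs) with a single forward pass that keeps a seen-call_ids set and the pending unanswered call, emitting synthetic outputs on the fly.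
import Mathlib
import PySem

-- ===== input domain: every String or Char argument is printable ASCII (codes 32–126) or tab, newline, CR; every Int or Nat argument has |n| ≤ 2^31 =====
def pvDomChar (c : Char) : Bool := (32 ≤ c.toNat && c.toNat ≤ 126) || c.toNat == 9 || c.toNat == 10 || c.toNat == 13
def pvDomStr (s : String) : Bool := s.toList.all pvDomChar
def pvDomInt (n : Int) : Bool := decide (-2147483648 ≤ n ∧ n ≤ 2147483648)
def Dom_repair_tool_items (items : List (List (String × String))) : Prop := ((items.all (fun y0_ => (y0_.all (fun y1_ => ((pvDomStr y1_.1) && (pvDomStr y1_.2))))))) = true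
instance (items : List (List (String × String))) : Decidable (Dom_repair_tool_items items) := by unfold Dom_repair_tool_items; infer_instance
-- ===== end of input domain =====

-- B replaces A's two index-mutating passes (orphan-dropping pop-loop, then synthetic-output insert-loop)
-- by one forward pass with a pending-call state; equivalence of the RETURN value is proved (neither mutates its argument).

-- shared thin wrappers over Python primitives (dict.get, `if cid:` truthiness, `if cid: seen.add(cid)`)
def pvGet (it : List (String × String)) (k : String) : Option String := (PySem.Dict.mk it).get? k

def pvSeenAdd (seen : PySem.Set String) (cid : Option String) : PySem.Set String :=
  match cid with
  | some s => if s != "" then PySem.Set.add seen s else seen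
  | none => seen

-- ===== PORT A =====
-- the dict literal A inserts; `cid.getD ""` stands for the Python value `cid`, faithful under
-- Pre_ (the call_id key is present on every function_call, so cid is a string there)
def pvSynthA (cid : Option String) : List (String × String) :=
  [("type", "function_call_output"), ("call_id", cid.getD ""), ("output", "ERROR: Tool execution was interrupted.")]

-- Pass 1: while-loop with repaired.pop(i) on orphan outputs (pop(i) at i < len = eraseIdx i)
def pvLoop1 (repaired : List (List (String × String))) (i : Nat) (seen : PySem.Set String) :
    List (List (String × String)) :=
  if h : i < repaired.length then
    if pvGet repaired[i] "type" == some "function_call" then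
      pvLoop1 repaired (i + 1) (pvSeenAdd seen (pvGet repaired[i] "call_id"))
    else if pvGet repaired[i] "type" == some "function_call_output" then
      match pvGet repaired[i] "call_id" with
      | some s =>
          if s != "" && PySem.Set.contains seen s then pvLoop1 repaired (i + 1) seen
          else pvLoop1 (repaired.eraseIdx i) i seen
      | none => pvLoop1 (repaired.eraseIdx i) i seen
    else pvLoop1 repaired (i + 1) seen
  else repaired
termination_by repaired.length - i
decreasing_by
  all_goals first
    | omega
    | (have := List.length_eraseIdx_of_lt h; omega)

-- Pass 2: while-loop inserting a synthetic output after every unanswered function_call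
def pvLoop2 (repaired : List (List (String × String))) (i : Nat) : List (List (String × String)) :=
  if h : i < repaired.length then
    if pvGet repaired[i] "type" == some "function_call" then
      if (match repaired[i + 1]? with
          | none => true
          | some nx => !(pvGet nx "type" == some "function_call_output"
              && pvGet nx "call_id" == pvGet repaired[i] "call_id")) then
        pvLoop2 (repaired.insertIdx (i + 1) (pvSynthA (pvGet repaired[i] "call_id"))) (i + 2)
      else pvLoop2 repaired (i + 1)
    else pvLoop2 repaired (i + 1)
  else repaired
termination_by repaired.length - i
decreasing_by
  all_goals first
    | omega
    | (simp only [List.length_insertIdx]; split <;> omega)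

def repair_tool_items (items : List (List (String × String))) : List (List (String × String)) :=
  pvLoop2 (pvLoop1 items 0 PySem.Set.empty) 0

-- ===== PORT B =====
def pvSynthB (cid : Option String) : List (String × String) :=
  [("type", "function_call_output"), ("call_id", cid.getD ""), ("output", "ERROR: Tool execution was interrupted.")]

-- flush(): emit the synthetic output for the pending call, if any
def pvFlushB (p : Option (Option String)) : List (List (String × String)) :=
  match p with
  | some c => [pvSynthB c]
  | none => []

-- the single forward pass of Source B; the list built by result.append(…) is produced front-to-back
def pvLoopB (items : List (List (String × String))) (seen : PySem.Set String)
    (p : Option (Option String)) : List (List (String × String)) :=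
  match items with
  | [] => pvFlushB p
  | it :: rest =>
    if pvGet it "type" == some "function_call" then
      let cid := pvGet it "call_id"
      pvFlushB p ++ it :: pvLoopB rest (pvSeenAdd seen cid) (some cid)
    else if pvGet it "type" == some "function_call_output" then
      match pvGet it "call_id" with
      | some s =>
          if s != "" && PySem.Set.contains seen s then
            if p == some (some s) then it :: pvLoopB rest seen none
            else pvFlushB p ++ it :: pvLoopB rest seen none
          else pvLoopB rest seen p
      | none => pvLoopB rest seen p
    else pvFlushB p ++ it :: pvLoopB rest seen none

def repair_tool_items_alt (items : List (List (String × String))) : List (List (String × String)) :=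
  pvLoopB items PySem.Set.empty none

-- ===== PRECONDITION & SPEC =====
-- Pre_ excludes inputs where some function_call item lacks the "call_id" key: there A (and B)
-- return a dict whose call_id value is Python's None, which is not a String of the declared type.
def Pre_repair_tool_items (items : List (List (String × String))) : Prop :=
  ∀ it ∈ items, pvGet it "type" = some "function_call" → (pvGet it "call_id").isSome = true
instance (items : List (List (String × String))) : Decidable (Pre_repair_tool_items items) := by
  unfold Pre_repair_tool_items; infer_instance

def pvWitness_repair_tool_items : (List (List (String × String))) :=
  [[("type", "function_call"), ("call_id", "a")], [("type", "message"), ("content", "hi")]]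

def Spec_repair_tool_items (items : List (List (String × String))) (out : List (List (String × String))) : Prop := out = repair_tool_items_alt items
instance (items : List (List (String × String))) (out : List (List (String × String))) : Decidable (Spec_repair_tool_items items out) := by unfold Spec_repair_tool_items; infer_instance

-- ===== CLAIM (what is proved, stated in full; the proofs are below) =====
def Claim_equal_repair_tool_items : Prop := ∀ (items : List (List (String × String))), Dom_repair_tool_items items → Pre_repair_tool_items items → Spec_repair_tool_items items (repair_tool_items items)

-- ===== LEMMAS AND PROOFS =====

-- functional reading of pass 1: drop outputs whose call_id is falsy or unseen, thread `seen`
def pvFilter1 (l : List (List (String × String))) (seen : PySem.Set String) :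
    List (List (String × String)) :=
  match l with
  | [] => []
  | it :: rest =>
    if pvGet it "type" == some "function_call" then
      it :: pvFilter1 rest (pvSeenAdd seen (pvGet it "call_id"))
    else if pvGet it "type" == some "function_call_output" then
      match pvGet it "call_id" with
      | some s =>
          if s != "" && PySem.Set.contains seen s then it :: pvFilter1 rest seen
          else pvFilter1 rest seen
      | none => pvFilter1 rest seen
    else it :: pvFilter1 rest seen

-- does the head of `rest` immediately answer a call with call_id `cid`?
def pvMatchHead (cid : Option String) (rest : List (List (String × String))) : Bool :=
  match rest with
  | nx :: _ => pvGet nx "type" == some "function_call_output" && pvGet nx "call_id" == cid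
  | [] => false

-- functional reading of pass 2
def pvFix2 (l : List (List (String × String))) : List (List (String × String)) :=
  match l with
  | [] => []
  | it :: rest =>
    if pvGet it "type" == some "function_call" then
      if pvMatchHead (pvGet it "call_id") rest then it :: pvFix2 rest
      else it :: pvSynthA (pvGet it "call_id") :: pvFix2 rest
    else it :: pvFix2 rest

-- pass 2 applied under a pending call with call_id `cid`
def pvPend (cid : Option String) (l : List (List (String × String))) :
    List (List (String × String)) :=
  if pvMatchHead cid l then pvFix2 l else pvSynthA cid :: pvFix2 l

theorem pv_insertIdx_eq {α : Type} (l : List α) (x : α) (i : Nat) (h : i ≤ l.length) :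
    l.insertIdx i x = l.take i ++ x :: l.drop i := by
  induction l generalizing i with
  | nil => simp_all
  | cons a t ih =>
    cases i with
    | zero => simp [List.insertIdx]
    | succ j =>
      have hj := ih j (by simpa using h)
      simp only [List.insertIdx] at hj ⊢
      simpa using hj

theorem pv_take_cons {α : Type} (l : List α) (i : Nat) (h : i < l.length)
    (X : List α) : l.take (i + 1) ++ X = l.take i ++ l[i] :: X := by
  rw [List.take_add_one, List.getElem?_eq_getElem h]
  simp only [Option.toList_some, List.append_assoc, List.singleton_append]

theorem pv_erase_take {α : Type} (l : List α) (i : Nat) (h : i < l.length) :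
    (l.eraseIdx i).take i = l.take i := by
  rw [List.eraseIdx_eq_take_drop_succ]
  have hl : (l.take i).length = i := by rw [List.length_take]; omega
  exact List.take_left' hl

theorem pv_erase_drop {α : Type} (l : List α) (i : Nat) (h : i < l.length) :
    (l.eraseIdx i).drop i = l.drop (i + 1) := by
  rw [List.eraseIdx_eq_take_drop_succ]
  have hl : (l.take i).length = i := by rw [List.length_take]; omega
  exact List.drop_left' hl

theorem pvLoop1_eq (repaired : List (List (String × String))) (i : Nat) (seen : PySem.Set String) :
    pvLoop1 repaired i seen = repaired.take i ++ pvFilter1 (repaired.drop i) seen := by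
  induction repaired, i, seen using pvLoop1.induct with
  | case1 repaired i seen h hc ih =>
    rw [pvLoop1, dif_pos h, if_pos hc, ih, List.drop_eq_getElem_cons h]
    simp only [pvFilter1, hc, if_pos]
    exact pv_take_cons _ _ h _
  | case2 repaired i seen h hnc ho s hcid hk ih =>
    rw [pvLoop1, dif_pos h, if_neg hnc, if_pos ho]
    simp only [hcid, hk, if_pos]
    rw [ih, List.drop_eq_getElem_cons h]
    simp only [pvFilter1, hnc, ho, if_pos, hcid, hk]
    exact pv_take_cons _ _ h _
  | case3 repaired i seen h hnc ho s hcid hk ih =>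
    rw [pvLoop1, dif_pos h, if_neg hnc, if_pos ho]
    simp only [hcid]
    rw [if_neg hk, ih, pv_erase_take _ _ h, pv_erase_drop _ _ h,
      List.drop_eq_getElem_cons h]
    simp only [pvFilter1, hnc, ho, if_pos, hcid, hk]
    simp
  | case4 repaired i seen h hnc ho hcid ih =>
    rw [pvLoop1, dif_pos h, if_neg hnc, if_pos ho]
    simp only [hcid]
    rw [ih, pv_erase_take _ _ h, pv_erase_drop _ _ h, List.drop_eq_getElem_cons h]
    simp only [pvFilter1, hnc, ho, if_pos, hcid]
    simp
  | case5 repaired i seen h hnc hno ih =>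
    rw [pvLoop1, dif_pos h, if_neg hnc, if_neg hno, ih, List.drop_eq_getElem_cons h]
    simp only [pvFilter1, hnc, hno]
    exact pv_take_cons _ _ h _
  | case6 repaired i seen h =>
    rw [pvLoop1, dif_neg h]
    have h1 : repaired.length ≤ i := by omega
    rw [List.drop_eq_nil_of_le h1, List.take_of_length_le h1]
    simp [pvFilter1]

theorem pvLoop2_eq (repaired : List (List (String × String))) (i : Nat) :
    pvLoop2 repaired i = repaired.take i ++ pvFix2 (repaired.drop i) := by
  induction repaired, i using pvLoop2.induct with
  | case1 repaired i h hc hneeds ih =>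
    rw [pvLoop2, dif_pos h, if_pos hc, if_pos hneeds, ih]
    have hlen : i + 1 ≤ repaired.length := by omega
    have hins : repaired.insertIdx (i + 1) (pvSynthA (pvGet repaired[i] "call_id"))
        = (repaired.take (i + 1) ++ [pvSynthA (pvGet repaired[i] "call_id")])
            ++ repaired.drop (i + 1) := by
      rw [pv_insertIdx_eq _ _ _ hlen]; simp
    have hlen2 : (repaired.take (i + 1) ++ [pvSynthA (pvGet repaired[i] "call_id")]).length
        = i + 2 := by simp [List.length_take, Nat.min_eq_left hlen]
    rw [show List.take (i + 2) (repaired.insertIdx (i + 1) (pvSynthA (pvGet repaired[i] "call_id"))) = repaired.take (i + 1) ++ [pvSynthA (pvGet repaired[i] "call_id")] by rw [hins]; exact List.take_left' hlen2,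
      show List.drop (i + 2) (repaired.insertIdx (i + 1) (pvSynthA (pvGet repaired[i] "call_id"))) = repaired.drop (i + 1) by rw [hins]; exact List.drop_left' hlen2]
    have hmh : pvMatchHead (pvGet repaired[i] "call_id") (repaired.drop (i + 1)) = false := by
      unfold pvMatchHead
      cases hd : repaired.drop (i + 1) with
      | nil => rfl
      | cons nx tl =>
        have hx : repaired[i + 1]? = some nx := by
          rw [← List.head?_drop, hd]; rfl
        simp only [hx] at hneeds
        simp at hneeds ⊢
        tauto
    rw [List.drop_eq_getElem_cons h]
    rw [List.append_assoc, pv_take_cons _ _ h]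
    simp only [pvFix2, hc, if_pos, List.singleton_append]
    split
    · next ht => exact absurd (ht.symm.trans hmh) (by decide)
    · rfl
  | case2 repaired i h hc hneeds ih =>
    rw [pvLoop2, dif_pos h, if_pos hc, if_neg hneeds, ih]
    have hmh : pvMatchHead (pvGet repaired[i] "call_id") (repaired.drop (i + 1)) = true := by
      unfold pvMatchHead
      cases hd : repaired.drop (i + 1) with
      | nil =>
        have hx : repaired[i + 1]? = none := by rw [← List.head?_drop, hd]; rfl
        simp [hx] at hneeds
      | cons nx tl =>
        have hx : repaired[i + 1]? = some nx := by rw [← List.head?_drop, hd]; rfl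
        simp only [hx] at hneeds
        simp at hneeds ⊢
        tauto
    rw [List.drop_eq_getElem_cons h]
    simp only [pvFix2, hc, if_pos, hmh]
    exact pv_take_cons _ _ h _
  | case3 repaired i h hnc ih =>
    rw [pvLoop2, dif_pos h, if_neg hnc, ih, List.drop_eq_getElem_cons h]
    simp only [pvFix2, hnc]
    exact pv_take_cons _ _ h _
  | case4 repaired i h =>
    rw [pvLoop2, dif_neg h]
    have h1 : repaired.length ≤ i := by omega
    rw [List.drop_eq_nil_of_le h1, List.take_of_length_le h1]
    simp [pvFix2]

theorem pvLoopB_eq (l : List (List (String × String))) :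
    ∀ seen : PySem.Set String,
      pvLoopB l seen none = pvFix2 (pvFilter1 l seen) ∧
      ∀ c, pvLoopB l seen (some c) = pvPend c (pvFilter1 l seen) := by
  induction l with
  | nil =>
    intro seen
    constructor
    · simp [pvLoopB, pvFlushB, pvFilter1, pvFix2]
    · intro c
      simp [pvLoopB, pvFlushB, pvFilter1, pvFix2, pvPend, pvMatchHead, pvSynthA, pvSynthB]
  | cons it rest ih =>
    intro seen
    by_cases hc : (pvGet it "type" == some "function_call") = true
    · -- function_call
      constructor
      · rw [pvLoopB]
        simp only [hc, if_pos, pvFlushB, List.nil_append]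
        rw [(ih _).2]
        simp [pvFilter1, hc, pvFix2, pvPend]
        split <;> simp
      · intro c
        rw [pvLoopB]
        simp only [hc, if_pos, pvFlushB]
        rw [(ih _).2]
        have hnm : pvMatchHead c (pvFilter1 (it :: rest) seen) = false := by
          simp only [pvFilter1, hc, if_pos, pvMatchHead]
          
          simp only [beq_iff_eq] at hc
          simp [hc]
        simp only [pvPend, hnm, if_neg, Bool.false_eq_true, not_false_iff]
        simp [pvFilter1, hc, pvFix2, pvSynthA, pvSynthB]
        split <;> simp
    · by_cases ho : (pvGet it "type" == some "function_call_output") = true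
      · -- function_call_output
        cases hcid : pvGet it "call_id" with
        | some s =>
          by_cases hk : (s != "" && PySem.Set.contains seen s) = true
          · -- kept output
            have hk' : ¬s = "" ∧ s ∈ seen := by simpa using hk
            have hflt : pvFilter1 (it :: rest) seen = it :: pvFilter1 rest seen := by
              simp [pvFilter1, hc, ho, hcid, hk'.1, hk'.2]
            constructor
            · rw [pvLoopB]
              simp only [hc, if_neg, ho, if_pos, hcid, hk, Bool.false_eq_true, not_false_iff]
              have hpn : ((none : Option (Option String)) == some (some s)) = false := rfl
              simp only [hpn, Bool.false_eq_true, if_neg, pvFlushB, List.nil_append,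
                not_false_iff]
              rw [(ih _).1, hflt]
              simp [pvFix2, hc]
            · intro c
              rw [pvLoopB]
              simp only [hc, if_neg, ho, if_pos, hcid, hk, Bool.false_eq_true, not_false_iff]
              rw [hflt]
              by_cases hm : (some c == some (some s) : Bool) = true
              · have hceq : c = some s := by simpa using hm
                have hmh : pvMatchHead c (it :: pvFilter1 rest seen) = true := by
                  simp [pvMatchHead, ho, hcid, hceq]
                simp only [hm, if_pos, pvPend, hmh]
                rw [(ih _).1]
                simp [pvFix2, hc]
              · have hcne : c ≠ some s := by simpa using hm
                have hmh : pvMatchHead c (it :: pvFilter1 rest seen) = false := by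
                  simp [pvMatchHead, ho, hcid]
                  intro h'; exact absurd h'.symm (by simpa using hcne)
                simp only [hm, if_neg, pvPend, hmh, Bool.false_eq_true, not_false_iff,
                  pvFlushB, List.cons_append, List.nil_append]
                rw [(ih _).1]
                simp [pvFix2, hc, pvSynthA, pvSynthB]
          · -- dropped output (unseen)
            have hk' : ¬s = "" → s ∉ seen := by
              intro hs hmem
              exact hk (by simp [hs, hmem])
            have hflt : pvFilter1 (it :: rest) seen = pvFilter1 rest seen := by
              simp [pvFilter1, hc, ho, hcid]
              exact hk'
            constructor
            · rw [pvLoopB]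
              simp only [hc, if_neg, ho, if_pos, hcid, hk, Bool.false_eq_true, not_false_iff]
              rw [(ih _).1, hflt]
            · intro c
              rw [pvLoopB]
              simp only [hc, if_neg, ho, if_pos, hcid, hk, Bool.false_eq_true, not_false_iff]
              rw [(ih _).2, hflt]
        | none =>
          have hflt : pvFilter1 (it :: rest) seen = pvFilter1 rest seen := by
            simp [pvFilter1, hc, ho, hcid]
          constructor
          · rw [pvLoopB]
            simp only [hc, if_neg, ho, if_pos, hcid, Bool.false_eq_true, not_false_iff]
            rw [(ih _).1, hflt]
          · intro c
            rw [pvLoopB]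
            simp only [hc, if_neg, ho, if_pos, hcid, Bool.false_eq_true, not_false_iff]
            rw [(ih _).2, hflt]
      · -- other item
        have hflt : pvFilter1 (it :: rest) seen = it :: pvFilter1 rest seen := by
          simp [pvFilter1, hc, ho]
        constructor
        · rw [pvLoopB]
          simp only [hc, ho, if_neg, pvFlushB, List.nil_append, Bool.false_eq_true,
            not_false_iff]
          rw [(ih _).1, hflt]
          simp [pvFix2, hc]
        · intro c
          rw [pvLoopB]
          simp only [hc, ho, if_neg, pvFlushB, Bool.false_eq_true, not_false_iff]
          have hmh : pvMatchHead c (it :: pvFilter1 rest seen) = false := by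
            simp [pvMatchHead, ho]
          rw [(ih _).1, hflt]
          simp [pvPend, hmh, pvFix2, hc, pvSynthA, pvSynthB]

-- ===== VERDICT (by name: the statement is the Claim_ definition above) =====
theorem repair_tool_items_spec : Claim_equal_repair_tool_items := by
  intro items _hdom _hpre
  unfold Spec_repair_tool_items repair_tool_items repair_tool_items_alt
  rw [pvLoop1_eq, pvLoop2_eq, (pvLoopB_eq items PySem.Set.empty).1]
  simp
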